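-- pv_equiv track=rewrite | github.com/legffy/CS100 | hw6/hw6_sol.py | distinctWordPairs
-- ===== SOURCE A (Python) =====
-- def distinctWordPairs(l,mS):
--     pairs = []
--     dPairs = []
--     for w in range(len(l)-1):
--         for sep in range(w+1,min(len(l),w+mS+1)):
--             t = tuple(sorted((l[w],l[sep])))
--             pairs.append(t)
--             if t not in dPairs:
--                 dPairs.append(t)
--     return [sorted(dPairs),pairs]
-- ===== SOURCE B (Python) =====
-- def distinctWordPairs(l, mS):
--     def go(rest):
--         if len(rest) <= 1:
--             return []
--         head, tail = rest[0], rest[1:]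
--         here = [(head, x) if head <= x else (x, head) for x in tail[:max(0, mS)]]
--         return here + go(tail)
--     pairs = go(l)
--     return [sorted(set(pairs)), pairs]
-- ===== Notes on version B (the rewrite author's own statement) =====
-- stated objective: alternative
-- what changed: Replaces A's index-driven nested range loops with fused inline dedup (a per-pair linear 'not in' scan) by structural recursion on the list's suffixes (head paired with a slice of the tail, no indices at all), deriving the distinct sorted list afterwards in a separate phase as sorted(set(pairs)).
import Mathlib
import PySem

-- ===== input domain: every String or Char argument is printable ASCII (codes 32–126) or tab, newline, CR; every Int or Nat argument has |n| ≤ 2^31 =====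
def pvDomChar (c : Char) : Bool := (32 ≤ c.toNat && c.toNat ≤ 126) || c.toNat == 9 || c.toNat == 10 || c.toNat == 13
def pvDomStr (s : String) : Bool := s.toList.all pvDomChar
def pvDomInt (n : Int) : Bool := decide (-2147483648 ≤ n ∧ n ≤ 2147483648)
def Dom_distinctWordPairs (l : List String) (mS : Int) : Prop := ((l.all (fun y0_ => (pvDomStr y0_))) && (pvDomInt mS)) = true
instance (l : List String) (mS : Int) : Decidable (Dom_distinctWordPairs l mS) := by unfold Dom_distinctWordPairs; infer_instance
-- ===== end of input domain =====

-- B replaces A's index-driven nested loops with fused online dedup by structural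
-- recursion on suffixes, deriving the distinct sorted list afterwards from a set.

-- tuple(sorted((a, b))) for exactly two strings (A's inner expression).
def pvPairSorted (a b : String) : String × String := if b < a then (b, a) else (a, b)

-- ===== PORT A =====
def distinctWordPairs (l : List String) (mS : Int) : List (List (String × String)) :=
  let st :=
    (PySem.List.pyRange 0 ((l.length : Int) - 1) 1).foldl
      (fun (st : List (String × String) × List (String × String)) w =>
        (PySem.List.pyRange (w + 1) (min (l.length : Int) (w + mS + 1)) 1).foldl
          (fun st sep =>
            let t := pvPairSorted (PySem.List.pyGetD l w "") (PySem.List.pyGetD l sep "")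
            (st.1 ++ [t], if st.2.contains t then st.2 else st.2 ++ [t]))
          st)
      ([], [])
  [PySem.List.sorted2 st.2 (fun p => p.1) (fun p => p.2) false, st.1]

-- ===== PORT B =====
-- '(head, x) if head <= x else (x, head)' of Source B
def pvPairB (a b : String) : String × String := if a ≤ b then (a, b) else (b, a)

-- Source B's 'go': recursion on the suffixes; 'tail[:max(0, mS)]' is the slice primitive.
def pvGo (mS : Int) : List String → List (String × String)
  | [] => []
  | h :: t => (PySem.List.slice t none (some (max 0 mS))).map (pvPairB h) ++ pvGo mS t

def distinctWordPairs_alt (l : List String) (mS : Int) : List (List (String × String)) :=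
  let pairs := pvGo mS l
  [PySem.List.sorted2 (PySem.Set.ofList pairs) (fun p => p.1) (fun p => p.2) false, pairs]

-- ===== PRECONDITION & SPEC =====
def Spec_distinctWordPairs (l : List String) (mS : Int) (out : List (List (String × String))) : Prop := out = distinctWordPairs_alt l mS
instance (l : List String) (mS : Int) (out : List (List (String × String))) : Decidable (Spec_distinctWordPairs l mS out) := by unfold Spec_distinctWordPairs; infer_instance

-- ===== CLAIM (what is proved, stated in full; the proofs are below) =====
def Claim_equal_distinctWordPairs : Prop := ∀ (l : List String) (mS : Int), Dom_distinctWordPairs l mS → Spec_distinctWordPairs l mS (distinctWordPairs l mS)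

-- ===== LEMMAS AND PROOFS =====

-- the two two-element-sort expressions agree
theorem pvPair_eq (a b : String) : pvPairSorted a b = pvPairB a b := by
  unfold pvPairSorted pvPairB
  rcases lt_or_ge b a with h | h
  · simp [h, not_le.mpr h]
  · simp [not_lt.mpr h, h]

-- A's inner loop over one window: appends the mapped pairs and Set.adds them.
theorem pvInnerFold {α : Type} [BEq α] (g : Int → α) (xs : List Int)
    (p : List α) (d : PySem.Set α) :
    xs.foldl (fun (st : List α × List α) x =>
        (st.1 ++ [g x], if st.2.contains (g x) then st.2 else st.2 ++ [g x])) (p, d)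
      = (p ++ xs.map g, PySem.Set.update d (xs.map g)) := by
  induction xs generalizing p d with
  | nil => simp [PySem.Set.update]
  | cons x xs ih =>
      simp only [List.foldl_cons, List.map_cons, PySem.Set.update_cons]
      rw [ih]
      simp [PySem.Set.add]; rfl

-- A's outer loop: concatenates the window results and updates the set with them.
theorem pvOuterFold {α : Type} [BEq α] (G : Int → List α) (ws : List Int)
    (p : List α) (d : PySem.Set α) :
    ws.foldl (fun (st : List α × List α) w =>
        (st.1 ++ G w, PySem.Set.update st.2 (G w))) (p, d)
      = (p ++ ws.flatMap G, PySem.Set.update d (ws.flatMap G)) := by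
  induction ws generalizing p d with
  | nil => simp [PySem.Set.update]
  | cons w ws ih =>
      simp only [List.foldl_cons, List.flatMap_cons]
      rw [ih, PySem.Set.update_append, List.append_assoc]

-- shift a unit-step range by one
theorem pvRangeShiftMap {β : Type} (a b : Int) (g : Int → β) :
    (PySem.List.pyRange (a + 1) (b + 1) 1).map g
      = (PySem.List.pyRange a b 1).map (fun x => g (x + 1)) := by
  rw [PySem.List.pyRange_one, PySem.List.pyRange_one]
  simp only [add_sub_add_right_eq_sub, List.map_map]
  exact List.map_congr_left (fun k _ => by simp [Function.comp]; ring_nf)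

theorem pvRangeShiftFlatMap {β : Type} (a b : Int) (G : Int → List β) :
    (PySem.List.pyRange (a + 1) (b + 1) 1).flatMap G
      = (PySem.List.pyRange a b 1).flatMap (fun x => G (x + 1)) := by
  simp only [List.flatMap_def]
  rw [pvRangeShiftMap a b G]

-- reading a prefix through pyGetD is mapping over take (m within bounds)
theorem pvMapGetDTake {β : Type} (f : String → β) :
    ∀ (t : List String) (m : Nat), m ≤ t.length →
      (PySem.List.pyRange 0 (m : Int) 1).map (fun j => f (PySem.List.pyGetD t j "")) =
        (t.take m).map f := by
  intro t m hm
  induction m with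
  | zero => simp [PySem.List.pyRange_one_eq_nil]
  | succ m ih =>
      have h1 : ((m : Int) + 1) = ((m + 1 : Nat) : Int) := by push_cast; ring
      rw [← h1, PySem.List.pyRange_one_succ_right (by positivity)]
      rw [List.map_append, ih (by omega)]
      have : t.take (m + 1) = t.take m ++ [t[m]'(by omega)] := by
        rw [List.take_add_one]; simp [List.getElem?_eq_getElem (by omega : m < t.length)]
      rw [this, List.map_append]
      simp [PySem.List.pyGetD_natCast, List.getElem?_eq_getElem (by omega : m < t.length)]

-- indexing through a cons cell
theorem pvGetD_cons (h : String) (t : List String) (x : Int) (hx : 0 ≤ x) :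
    PySem.List.pyGetD (h :: t) (x + 1) "" = PySem.List.pyGetD t x "" := by
  rw [show x + 1 = ((x.toNat + 1 : Nat) : Int) by omega, PySem.List.pyGetD_natCast,
      show x = ((x.toNat : Nat) : Int) by omega, PySem.List.pyGetD_natCast]
  have hmax : (max x 0).toNat = x.toNat := by omega
  simp [hmax]

theorem pvGetD_zero (h : String) (t : List String) :
    PySem.List.pyGetD (h :: t) 0 "" = h := by
  rw [show (0 : Int) = ((0 : Nat) : Int) from rfl, PySem.List.pyGetD_natCast]
  simp

-- the main pairs identity: A's double index loop builds exactly pvGo mS l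
theorem pvPairsEq (mS : Int) :
    ∀ (l : List String),
      (PySem.List.pyRange 0 ((l.length : Int) - 1) 1).flatMap
        (fun w => (PySem.List.pyRange (w + 1) (min (l.length : Int) (w + mS + 1)) 1).map
          (fun sep => pvPairSorted (PySem.List.pyGetD l w "") (PySem.List.pyGetD l sep "")))
      = pvGo mS l := by
  intro l
  induction l with
  | nil => simp [pvGo, PySem.List.pyRange_one_eq_nil]
  | cons h t ih =>
      rcases Nat.eq_zero_or_pos t.length with h0 | hpos
      · rw [List.length_eq_zero_iff.mp h0]
        simp [pvGo, PySem.List.pyRange_one_eq_nil, PySem.List.slice]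
      · have hcons : PySem.List.pyRange 0 (((h :: t).length : Int) - 1) 1
            = 0 :: PySem.List.pyRange 1 (((h :: t).length : Int) - 1) 1 := by
          apply PySem.List.pyRange_one_cons
          simp; omega
        rw [hcons, List.flatMap_cons, pvGo]
        congr 1
        · -- the w = 0 window is the mapped slice of the tail
          by_cases hms : mS ≤ 0
          · have e1 : PySem.List.pyRange (0 + 1) (min (((h :: t).length : Int)) (0 + mS + 1)) 1 = [] := by
              apply PySem.List.pyRange_one_eq_nil
              simp; omega
            have e2 : (max 0 mS) = (0 : Int) := by omega
            rw [e1, e2]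
            simp [PySem.List.slice_to t (le_refl (0:Int))]
          · have e2 : (max 0 mS) = mS := by omega
            have emin : min (((h :: t).length : Int)) (0 + mS + 1) = ((min t.length mS.toNat : Nat) : Int) + 1 := by
              simp; omega
            rw [e2, emin, show (0 + 1 : Int) = 0 + 1 from rfl, pvRangeShiftMap 0 ((min t.length mS.toNat : Nat) : Int)]
            have hmemb : ∀ x ∈ PySem.List.pyRange 0 ((min t.length mS.toNat : Nat) : Int) 1,
                pvPairSorted (PySem.List.pyGetD (h :: t) 0 "") (PySem.List.pyGetD (h :: t) (x + 1) "")
                  = pvPairB h (PySem.List.pyGetD t x "") := by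
              intro x hx
              have hx0 : 0 ≤ x := (PySem.List.mem_pyRange_one.mp hx).1
              rw [pvGetD_zero, pvGetD_cons h t x hx0, pvPair_eq]
            rw [List.map_congr_left hmemb,
                pvMapGetDTake (pvPairB h) t (min t.length mS.toNat) (by omega),
                PySem.List.slice_to t (by omega : (0:Int) ≤ mS)]
            conv_rhs => rw [List.take_eq_take_min]
            rw [Nat.min_comm mS.toNat t.length]
        · -- remaining windows = recursion on the tail
          have hlen : (((h :: t).length : Int) - 1) = ((t.length : Int) - 1) + 1 := by simp
          rw [hlen,
              show PySem.List.pyRange 1 ((t.length : Int) - 1 + 1) 1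
                 = PySem.List.pyRange (0 + 1) ((t.length : Int) - 1 + 1) 1 by norm_num,
              pvRangeShiftFlatMap 0 ((t.length : Int) - 1)]
          rw [← ih]
          simp only [List.flatMap_def]
          congr 1
          apply List.map_congr_left
          intro w hw
          have hw0 : 0 ≤ w := (PySem.List.mem_pyRange_one.mp hw).1
          have emin : min (((h :: t).length : Int)) (w + 1 + mS + 1) = min ((t.length : Int)) (w + mS + 1) + 1 := by
            simp; omega
          rw [emin, show (w + 1 + 1 : Int) = (w + 1) + 1 by ring,
              pvRangeShiftMap (w + 1) (min ((t.length : Int)) (w + mS + 1))]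
          apply List.map_congr_left
          intro x hx
          have hx0 : 0 ≤ x := le_trans (by omega) (PySem.List.mem_pyRange_one.mp hx).1
          rw [pvGetD_cons h t w hw0, pvGetD_cons h t x hx0]

-- ===== VERDICT (by name: the statement is the Claim_ definition above) =====
theorem distinctWordPairs_spec : Claim_equal_distinctWordPairs := by
  intro l mS _
  unfold Spec_distinctWordPairs distinctWordPairs distinctWordPairs_alt
  have h : ∀ w (st : List (String × String) × List (String × String)),
      (PySem.List.pyRange (w + 1) (min (l.length : Int) (w + mS + 1)) 1).foldl
        (fun (st : List (String × String) × List (String × String)) sep =>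
          let t := pvPairSorted (PySem.List.pyGetD l w "") (PySem.List.pyGetD l sep "")
          (st.1 ++ [t], if st.2.contains t then st.2 else st.2 ++ [t])) st
      = (st.1 ++ (PySem.List.pyRange (w + 1) (min (l.length : Int) (w + mS + 1)) 1).map
            (fun sep => pvPairSorted (PySem.List.pyGetD l w "") (PySem.List.pyGetD l sep "")),
         PySem.Set.update st.2 ((PySem.List.pyRange (w + 1) (min (l.length : Int) (w + mS + 1)) 1).map
            (fun sep => pvPairSorted (PySem.List.pyGetD l w "") (PySem.List.pyGetD l sep "")))) := by
    intro w st
    exact pvInnerFold _ _ st.1 st.2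
  simp only [h]
  rw [pvOuterFold]
  rw [pvPairsEq mS l]
  simp [PySem.Set.update_nil_left]
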